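-- pv_equiv track=rewrite | github.com/algolia/docsearch-scraper | scraper/src/strategies/hierarchy.py | get_hierarchy_radio
-- ===== SOURCE A (Python) =====
-- def get_hierarchy_radio(hierarchy, current_level, levels):
--     """Returns the radio hierarchy for the record, where only one level is
--     filled and the others are empty
--     Ex: {
--         lvl0: None,
--         lvl1: None,
--         lvl2: Baz,
--         lvl3: None,
--         lvl4: None,
--         lvl5: None,
--         lvl6: None
--     }
--     """
--
--     hierarchy_radio = {}
--     is_found = False
--     for level in reversed(levels):
--         if level == 'content':
--             continue
--
--         value = hierarchy[level]
--         if is_found is False and value is not None and current_level != 'content':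
--             is_found = True
--             hierarchy_radio[level] = value
--             continue
--
--         hierarchy_radio[level] = None
--
--     return hierarchy_radio
-- ===== SOURCE B (Python) =====
-- def get_hierarchy_radio(hierarchy, current_level, levels):
--     """Radio hierarchy: only the deepest filled non-content level keeps its
--     value, every other non-content level is None."""
--     target = None
--     if current_level != 'content':
--         for level in levels:
--             if level != 'content' and hierarchy[level] is not None:
--                 target = level
--     return {level: (hierarchy[level] if level == target else None)
--             for level in reversed(levels) if level != 'content'}
-- ===== Notes on version B (the rewrite author's own statement) =====
-- stated objective: simpler
-- what changed: Replaces A's stateful reversed loop with an is_found flag by first computing the single target level (last non-content level with a non-None value) and then emitting the dict in one comprehension keyed against that target; Pre_ excludes inputs where A raises KeyError and levels lists with duplicate non-content levels, an unspecified corner where the per-key result depends on dict re-insertion order.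
-- outside the precondition, e.g. on get_hierarchy_radio({'a': 'X'}, 'a', ['a', 'a']): A returns {'a': None}, B returns {'a': 'X'}
import Mathlib
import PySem

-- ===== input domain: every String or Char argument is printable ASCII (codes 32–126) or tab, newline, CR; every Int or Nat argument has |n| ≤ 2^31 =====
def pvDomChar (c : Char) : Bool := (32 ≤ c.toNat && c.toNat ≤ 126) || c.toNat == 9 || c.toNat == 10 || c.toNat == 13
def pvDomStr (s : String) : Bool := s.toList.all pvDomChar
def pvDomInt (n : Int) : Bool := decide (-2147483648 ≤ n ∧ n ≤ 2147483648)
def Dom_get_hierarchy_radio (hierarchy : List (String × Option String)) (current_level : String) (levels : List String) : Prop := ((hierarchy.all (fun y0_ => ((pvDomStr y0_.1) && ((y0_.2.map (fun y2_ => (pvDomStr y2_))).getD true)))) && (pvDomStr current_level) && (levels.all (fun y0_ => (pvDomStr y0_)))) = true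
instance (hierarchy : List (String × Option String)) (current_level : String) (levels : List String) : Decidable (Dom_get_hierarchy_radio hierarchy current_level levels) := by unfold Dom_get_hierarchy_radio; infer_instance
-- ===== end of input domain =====

-- B computes the single deepest filled non-content level first and then builds the dict in one comprehension (simpler than A's stateful is_found loop).


-- shared helper: hierarchy[level] — first-match association-list lookup (Pre_ guarantees the key is present,
-- so the KeyError case (find? = none) never occurs inside the claim; we flatten it to none)
def pyLookup (hierarchy : List (String × Option String)) (k : String) : Option String :=
  (((hierarchy.find? (fun p => p.1 == k)).map (fun p => p.2)).getD none)

-- ===== PORT A =====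
def get_hierarchy_radio (hierarchy : List (String × Option String)) (current_level : String) (levels : List String) : List (String × Option String) :=
  (levels.reverse.foldl
    (fun (st : PySem.Dict String (Option String) × Bool) level =>
      if level == "content" then st
      else
        let value := pyLookup hierarchy level
        if st.2 == false && value.isSome && !(current_level == "content")
        then (st.1.insert level value, true)
        else (st.1.insert level none, st.2))
    (PySem.Dict.empty, false)).1.items

-- ===== PORT B =====
-- 'level != "content" and hierarchy[level] is not None'
def pvHit (hierarchy : List (String × Option String)) (l : String) : Bool :=
  !(l == "content") && (pyLookup hierarchy l).isSome

def get_hierarchy_radio_alt (hierarchy : List (String × Option String)) (current_level : String) (levels : List String) : List (String × Option String) :=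
  let target : Option String :=
    if !(current_level == "content") then
      levels.foldl (fun t level => if pvHit hierarchy level then some level else t) none
    else none
  (levels.reverse.foldl
    (fun (d : PySem.Dict String (Option String)) level =>
      if level == "content" then d
      else d.insert level (if some level == target then pyLookup hierarchy level else none))
    PySem.Dict.empty).items

-- ===== PRECONDITION & SPEC =====
-- Pre_ excludes (a) levels lists containing a non-content level missing from hierarchy, where A raises KeyError,
-- and (b) lists with duplicate non-content levels — a malformed configuration the scraper never produces, on
-- which the per-key result depends on dict re-insertion order: A clears the duplicated level, B keeps its
-- value, and either reading of this unspecified corner is defensible.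
def Pre_get_hierarchy_radio (hierarchy : List (String × Option String)) (current_level : String) (levels : List String) : Prop :=
  (levels.all (fun l => l == "content" || hierarchy.any (fun p => p.1 == l))) = true ∧
  (levels.filter (fun l => !(l == "content"))).Nodup

instance (hierarchy : List (String × Option String)) (current_level : String) (levels : List String) : Decidable (Pre_get_hierarchy_radio hierarchy current_level levels) := by unfold Pre_get_hierarchy_radio; infer_instance

def pvWitness_get_hierarchy_radio : (List (String × Option String)) × String × List String :=
  ([("lvl0", some "Foo"), ("lvl1", none)], "lvl0", ["lvl0", "content", "lvl1"])

def Spec_get_hierarchy_radio (hierarchy : List (String × Option String)) (current_level : String) (levels : List String) (out : List (String × Option String)) : Prop := out = get_hierarchy_radio_alt hierarchy current_level levels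
instance (hierarchy : List (String × Option String)) (current_level : String) (levels : List String) (out : List (String × Option String)) : Decidable (Spec_get_hierarchy_radio hierarchy current_level levels out) := by unfold Spec_get_hierarchy_radio; infer_instance

-- ===== CLAIM (what is proved, stated in full; the proofs are below) =====
def Claim_equal_get_hierarchy_radio : Prop := ∀ (hierarchy : List (String × Option String)) (current_level : String) (levels : List String), Dom_get_hierarchy_radio hierarchy current_level levels → Pre_get_hierarchy_radio hierarchy current_level levels → Spec_get_hierarchy_radio hierarchy current_level levels (get_hierarchy_radio hierarchy current_level levels)

-- ===== LEMMAS AND PROOFS =====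

-- B's last-match fold equals find? over the reversed list
theorem pv_lastMatch_eq_reverse_find (hierarchy : List (String × Option String)) :
    ∀ (xs : List String) (acc : Option String),
      xs.foldl (fun t level => if pvHit hierarchy level then some level else t) acc
        = (xs.reverse.find? (pvHit hierarchy)).or acc := by
  intro xs
  induction xs with
  | nil => intro acc; simp
  | cons x xs ih =>
      intro acc
      simp only [List.foldl_cons, ih, List.reverse_cons, List.find?_append]
      cases h : xs.reverse.find? (pvHit hierarchy) with
      | some v => simp [Option.or]
      | none =>
          cases hx : pvHit hierarchy x <;> simp [List.find?, hx, Option.or]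

-- main loop agreement when current_level ≠ 'content' (A's body after `!(cl == "content")` reduced to true)
theorem pv_loop_agree (hierarchy : List (String × Option String)) :
    ∀ (L : List String) (d : PySem.Dict String (Option String)) (found : Bool) (t : Option String),
      (L.filter (fun l => !(l == "content"))).Nodup →
      (found = false → t = L.find? (pvHit hierarchy)) →
      (found = true → ∀ l ∈ L, (l == "content") = false → t ≠ some l) →
      (L.foldl
        (fun (st : PySem.Dict String (Option String) × Bool) level =>
          if level == "content" then st
          else
            if st.2 == false && (pyLookup hierarchy level).isSome && true
            then (st.1.insert level (pyLookup hierarchy level), true)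
            else (st.1.insert level none, st.2))
        (d, found)).1
      = L.foldl
          (fun (d : PySem.Dict String (Option String)) level =>
            if level == "content" then d
            else d.insert level (if some level == t then pyLookup hierarchy level else none))
          d := by
  intro L
  induction L with
  | nil => intro d found t _ _ _; rfl
  | cons l L ih =>
      intro d found t hnd hfalse htrue
      simp only [List.foldl_cons]
      by_cases hc : (l == "content") = true
      · rw [if_pos hc, if_pos hc]
        have hnd' : (L.filter (fun l => !(l == "content"))).Nodup := by
          rwa [List.filter_cons_of_neg (by simp [hc])] at hnd
        refine ih d found t hnd' ?_ ?_
        · intro hf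
          rw [hfalse hf, List.find?]
          simp [pvHit, hc]
        · intro hf l' hl' hlc; exact htrue hf l' (List.mem_cons_of_mem _ hl') hlc
      · have hc' : (l == "content") = false := by simpa using hc
        rw [if_neg hc, if_neg hc]
        have hfc : (l :: L).filter (fun l => !(l == "content")) =
            l :: L.filter (fun l => !(l == "content")) :=
          List.filter_cons_of_pos (by simp [hc'])
        rw [hfc, List.nodup_cons] at hnd
        obtain ⟨hlnotin, hnd'⟩ := hnd
        cases hfd : found with
        | true =>
            have htne : t ≠ some l := htrue hfd l List.mem_cons_self hc'
            have hbne : (some l == t) = false := by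
              rw [beq_eq_false_iff_ne]
              intro h; exact htne h.symm
            rw [if_neg (by simp), hbne]
            rw [if_neg (by simp)]
            exact ih _ true t hnd' (by intro h; exact absurd h (by decide))
              (fun _ l' hl' hlc => htrue hfd l' (List.mem_cons_of_mem _ hl') hlc)
        | false =>
            have ht : t = (l :: L).find? (pvHit hierarchy) := hfalse hfd
            cases hhit : (pyLookup hierarchy l).isSome with
            | true =>
                have hp : pvHit hierarchy l = true := by simp [pvHit, hc', hhit]
                have ht' : t = some l := by rw [ht, List.find?, hp]
                rw [if_pos (by simp), ht']
                rw [if_pos (by simp)]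
                refine ih _ true (some l) hnd' (by intro h; exact absurd h (by decide)) ?_
                intro _ l' hl' hlc hEq
                have hll' : l = l' := by injection hEq
                exact hlnotin (by rw [hll']; exact List.mem_filter.mpr ⟨hl', by simp [hlc]⟩)
            | false =>
                have hp : pvHit hierarchy l = false := by simp [pvHit, hhit]
                have ht' : t = L.find? (pvHit hierarchy) := by rw [ht, List.find?, hp]
                have hbne : (some l == t) = false := by
                  cases hT : t with
                  | none => rfl
                  | some v =>
                      have hv : pvHit hierarchy v = true :=
                        List.find?_some (ht'.symm.trans hT)
                      rw [beq_eq_false_iff_ne]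
                      intro h
                      rw [← Option.some.inj h] at hv
                      rw [hp] at hv
                      exact Bool.false_ne_true hv
                rw [if_neg (by simp), hbne]
                rw [if_neg (by simp)]
                exact ih _ false t hnd' (fun _ => ht')
                  (by intro h; exact absurd h (by decide))

-- loop agreement when current_level = 'content': both sides insert none everywhere
theorem pv_loop_content (hierarchy : List (String × Option String)) :
    ∀ (L : List String) (d : PySem.Dict String (Option String)) (found : Bool),
      (L.foldl
        (fun (st : PySem.Dict String (Option String) × Bool) level =>
          if level == "content" then st
          else
            if st.2 == false && (pyLookup hierarchy level).isSome && false
            then (st.1.insert level (pyLookup hierarchy level), true)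
            else (st.1.insert level none, st.2))
        (d, found)).1
      = L.foldl
          (fun (d : PySem.Dict String (Option String)) level =>
            if level == "content" then d
            else d.insert level
              (if some level == (none : Option String) then pyLookup hierarchy level else none))
          d := by
  intro L
  induction L with
  | nil => intro d found; rfl
  | cons l L ih =>
      intro d found
      simp only [List.foldl_cons]
      by_cases hc : (l == "content") = true
      · rw [if_pos hc, if_pos hc]; exact ih d found
      · rw [if_neg hc, if_neg hc]
        rw [if_neg (by simp), if_neg (by simp)]
        exact ih _ found

-- ===== VERDICT (by name: the statement is the Claim_ definition above) =====
theorem get_hierarchy_radio_spec : Claim_equal_get_hierarchy_radio := by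
  intro hierarchy current_level levels _ hpre
  unfold Spec_get_hierarchy_radio get_hierarchy_radio get_hierarchy_radio_alt
  cases hcl : (current_level == "content") with
  | true =>
      simp only [Bool.not_true, Bool.false_eq_true, if_false]
      rw [pv_loop_content hierarchy levels.reverse PySem.Dict.empty false]
  | false =>
      simp only [Bool.not_false, if_true]
      rw [pv_lastMatch_eq_reverse_find hierarchy levels none, Option.or_none]
      rw [pv_loop_agree hierarchy levels.reverse PySem.Dict.empty false
        (levels.reverse.find? (pvHit hierarchy))
        (by rw [List.filter_reverse]; exact List.nodup_reverse.mpr hpre.2)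
        (fun _ => rfl) (by intro h; exact absurd h (by decide))]
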